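-- pv_equiv track=rewrite | github.com/Yamina-Romani/Data_CentricProcess | methodCalls.py | numberCalls
-- ===== SOURCE A (Python) =====
-- def numberCalls(calls, c1, c2):
--     nbr = 0
--     for call in calls:
--         if call[0] == c1:
--             nbr = 0
--             for i in range(len(call)):
--
--                 if i != 0 and call[i] == c2:
--                     nbr = nbr + 1
--     return nbr
-- ===== SOURCE B (Python) =====
-- def numberCalls(calls, c1, c2):
--     # scan from the end: the last call whose head is c1 decides the result
--     for call in reversed(calls):
--         if call[0] == c1:
--             return sum(1 for x in call[1:] if x == c2)
--     return 0
-- ===== Notes on version B (the rewrite author's own statement) =====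
-- stated objective: simpler
-- what changed: A rescans every matching call front-to-back, resetting a counter; B scans the list once in reverse and returns the tally of c2 in the tail of the first match it meets, with an early exit.
-- outside the precondition, e.g. on numberCalls([[]], 'a', 'b'): A raises IndexError, B raises IndexError
import Mathlib
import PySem

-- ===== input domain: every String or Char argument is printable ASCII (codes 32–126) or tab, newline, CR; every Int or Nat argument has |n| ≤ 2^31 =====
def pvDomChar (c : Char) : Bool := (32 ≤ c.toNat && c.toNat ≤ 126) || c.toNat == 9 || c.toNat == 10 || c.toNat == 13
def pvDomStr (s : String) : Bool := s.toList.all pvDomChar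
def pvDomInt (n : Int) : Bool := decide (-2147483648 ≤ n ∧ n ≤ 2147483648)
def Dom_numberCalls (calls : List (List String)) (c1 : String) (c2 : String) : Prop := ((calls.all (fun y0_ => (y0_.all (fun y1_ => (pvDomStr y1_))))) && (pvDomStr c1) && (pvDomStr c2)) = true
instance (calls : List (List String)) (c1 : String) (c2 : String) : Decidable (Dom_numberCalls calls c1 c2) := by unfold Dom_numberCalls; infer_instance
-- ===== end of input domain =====

-- B replaces A's full front-to-back rescan of every matching call by a single reverse
-- scan with an early exit at the last matching call (objective: simpler).

-- ===== PORT A =====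
def numberCalls (calls : List (List String)) (c1 : String) (c2 : String) : Int :=
  calls.foldl
    (fun nbr call =>
      if PySem.List.pyGetD call 0 "" = c1 then
        (PySem.List.pyRange 0 (call.length : Int) 1).foldl
          (fun n i => if i ≠ 0 ∧ PySem.List.pyGetD call i "" = c2 then n + 1 else n) 0
      else nbr)
    0

-- ===== PORT B =====
-- reverse scan: first call (from the end) whose head is c1 decides the result
def numberCallsRevGo (c1 c2 : String) : List (List String) → Int
  | [] => 0
  | call :: rest =>
    if PySem.List.pyGetD call 0 "" = c1 then
      (PySem.List.slice call (some 1) none).foldl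
        (fun n x => if x = c2 then n + 1 else n) 0
    else numberCallsRevGo c1 c2 rest

def numberCalls_alt (calls : List (List String)) (c1 : String) (c2 : String) : Int :=
  numberCallsRevGo c1 c2 calls.reverse

-- ===== PRECONDITION & SPEC =====
-- A evaluates call[0] for every call, so any empty call raises IndexError; Pre_ excludes those inputs.
def Pre_numberCalls (calls : List (List String)) (c1 : String) (c2 : String) : Prop :=
  ∀ call ∈ calls, call ≠ []
instance (calls : List (List String)) (c1 : String) (c2 : String) : Decidable (Pre_numberCalls calls c1 c2) := by unfold Pre_numberCalls; infer_instance

def pvWitness_numberCalls : List (List String) × String × String :=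
  ([["a", "b", "b"], ["c", "b"]], "a", "b")

def Spec_numberCalls (calls : List (List String)) (c1 : String) (c2 : String) (out : Int) : Prop := out = numberCalls_alt calls c1 c2
instance (calls : List (List String)) (c1 : String) (c2 : String) (out : Int) : Decidable (Spec_numberCalls calls c1 c2 out) := by unfold Spec_numberCalls; infer_instance

-- ===== CLAIM (what is proved, stated in full; the proofs are below) =====
def Claim_equal_numberCalls : Prop := ∀ (calls : List (List String)) (c1 : String) (c2 : String), Dom_numberCalls calls c1 c2 → Pre_numberCalls calls c1 c2 → Spec_numberCalls calls c1 c2 (numberCalls calls c1 c2)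

-- ===== LEMMAS AND PROOFS =====

-- A's inner counting loop over indices equals B's tally over the tail slice, for nonempty call
theorem inner_eq (call : List String) (c2 : String) (h : call ≠ []) :
    (PySem.List.pyRange 0 (call.length : Int) 1).foldl
      (fun n i => if i ≠ 0 ∧ PySem.List.pyGetD call i "" = c2 then n + 1 else n) (0 : Int)
    = (PySem.List.slice call (some 1) none).foldl
        (fun n x => if x = c2 then n + 1 else n) 0 := by
  have hlen : (1 : Int) ≤ (call.length : Int) := by
    have := List.length_pos_iff.mpr h; omega
  rw [PySem.List.pyRange_one_append 0 1 (call.length : Int) (by omega) hlen,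
      List.foldl_append, show PySem.List.pyRange 0 1 1 = [0] from PySem.List.pyRange_one_singleton 0]
  simp only [List.foldl_cons, List.foldl_nil, ne_eq, not_true_eq_false, false_and, if_false]
  have h1 : List.foldl (fun n i => if ¬i = 0 ∧ PySem.List.pyGetD call i "" = c2 then n + 1 else n) (0:Int) (PySem.List.pyRange 1 (call.length:Int) 1)
      = List.foldl (fun n i => if PySem.List.pyGetD call i "" = c2 then n + 1 else n) 0 (PySem.List.pyRange 1 (call.length:Int) 1) :=
    PySem.List.foldl_congr_mem _ _ _ _ (by
      intro acc x hx
      have := (PySem.List.mem_pyRange_one).mp hx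
      have hx0 : ¬ x = 0 := by omega
      simp only [hx0, not_false_eq_true, true_and])
  rw [h1]
  rw [PySem.List.foldl_pyRange_pyGetD' (a := 1) call "" (fun n x => if x = c2 then n + 1 else n) 0 (by omega)]
  simp [PySem.List.slice_from_one, List.drop_one]

theorem main_eq (c1 c2 : String) (calls : List (List String))
    (hpre : ∀ call ∈ calls, call ≠ []) :
    numberCalls calls c1 c2 = numberCallsRevGo c1 c2 calls.reverse := by
  induction calls using List.reverseRecOn with
  | nil => simp [numberCalls, numberCallsRevGo]
  | append_singleton xs x ih =>
    have hx : x ≠ [] := hpre x (by simp)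
    have hxs : ∀ call ∈ xs, call ≠ [] := fun c hc => hpre c (by simp [hc])
    unfold numberCalls
    rw [List.foldl_append, List.foldl_cons, List.foldl_nil,
        List.reverse_append, List.reverse_singleton, List.singleton_append,
        numberCallsRevGo]
    by_cases hp : PySem.List.pyGetD x 0 "" = c1
    · simp only [hp, if_true]
      exact inner_eq x c2 hx
    · simp only [hp, if_false]
      exact ih hxs

-- ===== VERDICT (by name: the statement is the Claim_ definition above) =====
theorem numberCalls_spec : Claim_equal_numberCalls := by
  intro calls c1 c2 _ hpre
  unfold Spec_numberCalls numberCalls_alt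
  exact main_eq c1 c2 calls hpre
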